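-- pv_equiv track=rewrite | github.com/icelandic-lt/IceEval | download_datasets.py | parse_tsv
-- ===== SOURCE A (Python) =====
-- import itertools
--
-- def parse_tsv(document, max_fields, token_field=0, label_field=1):
--     """Parse a document in a tab-seperated value (tsv) format.
--
--     :param document: The .tsv document as a string.
--     :param max_fields: The number of tab-seperated values each non-empty line should contain.
--     :param token_field: The index of the field which contains the token.
--     :param label_field: The index of the field which contains the label.
--     :return: A list of sentences, each of which is represented with a dictionary of tokens and tags.
--     """
--     lines = document.splitlines()
--     sentences = []
--
--     for key, group in itertools.groupby(lines, key=lambda x: x != ''):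
--         if key:
--             sentence = [line.strip().split('\t')[:max_fields] for line in group]
--             s_json = {
--                 'tokens': [t[token_field] for t in sentence],
--                 'tags': [t[label_field] for t in sentence]
--             }
--
--             sentences.append(s_json)
--
--     return sentences
-- ===== SOURCE B (Python) =====
-- def parse_tsv(document, max_fields, token_field=0, label_field=1):
--     """Staged: locate blank-line positions first, then slice the sentence blocks by index pairs."""
--     lines = document.splitlines()
--     blanks = [-1] + [i for i, line in enumerate(lines) if line == ''] + [len(lines)]
--     sentences = []
--     for a, b in zip(blanks, blanks[1:]):
--         if a + 1 < b:
--             rows = [line.strip().split('\t')[:max_fields] for line in lines[a + 1:b]]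
--             sentences.append({'tokens': [r[token_field] for r in rows],
--                               'tags': [r[label_field] for r in rows]})
--     return sentences
-- ===== Notes on version B (the rewrite author's own statement) =====
-- stated objective: alternative
-- what changed: Replaced itertools.groupby streaming grouping by a staged index-arithmetic pass: first collect the positions of all blank lines, then slice the sentence blocks directly out of the line list by consecutive blank-index pairs (skipping empty spans).
import Mathlib
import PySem

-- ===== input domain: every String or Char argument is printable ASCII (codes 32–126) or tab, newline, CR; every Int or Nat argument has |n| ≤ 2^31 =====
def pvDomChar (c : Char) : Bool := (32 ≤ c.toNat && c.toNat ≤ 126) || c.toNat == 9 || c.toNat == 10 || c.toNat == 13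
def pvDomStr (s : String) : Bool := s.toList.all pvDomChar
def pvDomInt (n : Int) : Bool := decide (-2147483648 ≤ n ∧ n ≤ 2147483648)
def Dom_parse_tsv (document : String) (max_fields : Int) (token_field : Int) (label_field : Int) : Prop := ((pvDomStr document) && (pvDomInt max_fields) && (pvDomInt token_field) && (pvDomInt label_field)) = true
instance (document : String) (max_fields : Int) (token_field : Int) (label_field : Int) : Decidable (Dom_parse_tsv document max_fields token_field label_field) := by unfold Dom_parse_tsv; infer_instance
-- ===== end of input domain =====

-- B replaces itertools.groupby streaming grouping by a staged pass: collect the blank-line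
-- positions first, then slice the sentence blocks out by index pairs (objective: alternative).

-- ===== PORT A =====
-- key(x) = (x != '')
def pvKey (x : String) : Bool := x ≠ ""

-- itertools.groupby helper: take the maximal leading run of lines whose key equals k
def pvTakeRun (k : Bool) : List String → List String × List String
  | [] => ([], [])
  | x :: xs =>
    if pvKey x == k then ((x :: (pvTakeRun k xs).1), (pvTakeRun k xs).2)
    else ([], x :: xs)

theorem pvTakeRun_rest_length (k : Bool) (xs : List String) :
    (pvTakeRun k xs).2.length ≤ xs.length := by
  induction xs with
  | nil => simp [pvTakeRun]
  | cons x xs ih =>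
    simp only [pvTakeRun]
    split
    · simpa using Nat.le_succ_of_le ih
    · simp

-- itertools.groupby(lines, key=pvKey): consecutive runs with their key
def pvGroupby : List String → List (Bool × List String)
  | [] => []
  | x :: xs =>
    (pvKey x, x :: (pvTakeRun (pvKey x) xs).1) :: pvGroupby (pvTakeRun (pvKey x) xs).2
termination_by l => l.length
decreasing_by
  have := pvTakeRun_rest_length (pvKey x) xs
  simp
  omega

-- line.strip().split('\t')[:max_fields]  ('\t' ≠ '' so split? never returns none; getD [] is unreachable)
def pvFields (max_fields : Int) (line : String) : List String :=
  PySem.List.slice ((PySem.Str.split? (PySem.Str.strip line) "\t").getD []) none (some max_fields)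

-- the sentence dict {'tokens': …, 'tags': …} built for one group (A's two comprehensions);
-- t[token_field] / t[label_field] ported as pyGetD (IndexError inputs excluded by Pre_)
def pvSentA (max_fields token_field label_field : Int) (g : List String) : List (String × List String) :=
  [("tokens", (g.map (pvFields max_fields)).map (fun t => PySem.List.pyGetD t token_field "")),
   ("tags", (g.map (pvFields max_fields)).map (fun t => PySem.List.pyGetD t label_field ""))]

def parse_tsv (document : String) (max_fields : Int) (token_field : Int) (label_field : Int) : List (List (String × List String)) :=
  (pvGroupby (PySem.Str.splitlines document)).foldl
    (fun sentences p =>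
      if p.1 then sentences ++ [pvSentA max_fields token_field label_field p.2] else sentences)
    []

-- ===== PORT B =====
-- [i for i, line in enumerate(lines) if line == '']
def pvBlanks (lines : List String) : List Int :=
  (PySem.List.enumerate lines 0).filterMap (fun p => if p.2 = "" then some p.1 else none)

-- the sentence dict built from one sliced block: rows, then tokens/tags columns (Source B's loop body)
def pvSentB (max_fields token_field label_field : Int) (block : List String) : List (String × List String) :=
  let rows := block.map (pvFields max_fields)
  [("tokens", rows.map (fun r => PySem.List.pyGetD r token_field "")),
   ("tags", rows.map (fun r => PySem.List.pyGetD r label_field ""))]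

def parse_tsv_alt (document : String) (max_fields : Int) (token_field : Int) (label_field : Int) : List (List (String × List String)) :=
  let lines := PySem.Str.splitlines document
  let blanks := (-1 : Int) :: pvBlanks lines ++ [(lines.length : Int)]
  (blanks.zip blanks.tail).foldl
    (fun sentences p =>
      if p.1 + 1 < p.2 then
        sentences ++ [pvSentB max_fields token_field label_field
          (PySem.List.slice lines (some (p.1 + 1)) (some p.2))]
      else sentences) []

-- ===== PRECONDITION & SPEC =====
-- Pre_ excludes exactly the inputs where Python A raises IndexError: some non-empty line whose
-- (stripped, tab-split, sliced) field list does not admit token_field or label_field as an index.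
def Pre_parse_tsv (document : String) (max_fields : Int) (token_field : Int) (label_field : Int) : Prop :=
  ∀ line ∈ PySem.Str.splitlines document, line ≠ "" →
    PySem.Raise.InRange (PySem.List.slice ((PySem.Str.split? (PySem.Str.strip line) "\t").getD []) none (some max_fields)).length token_field ∧
    PySem.Raise.InRange (PySem.List.slice ((PySem.Str.split? (PySem.Str.strip line) "\t").getD []) none (some max_fields)).length label_field
instance (document : String) (max_fields : Int) (token_field : Int) (label_field : Int) : Decidable (Pre_parse_tsv document max_fields token_field label_field) := by unfold Pre_parse_tsv; infer_instance

def pvWitness_parse_tsv : String × Int × Int × Int := ("a\tN\nb\tV\n\nc\tN", 2, 0, 1)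

def Spec_parse_tsv (document : String) (max_fields : Int) (token_field : Int) (label_field : Int) (out : List (List (String × List String))) : Prop := out = parse_tsv_alt document max_fields token_field label_field
instance (document : String) (max_fields : Int) (token_field : Int) (label_field : Int) (out : List (List (String × List String))) : Decidable (Spec_parse_tsv document max_fields token_field label_field out) := by unfold Spec_parse_tsv; infer_instance

-- ===== CLAIM (what is proved, stated in full; the proofs are below) =====
def Claim_equal_parse_tsv : Prop := ∀ (document : String) (max_fields : Int) (token_field : Int) (label_field : Int), Dom_parse_tsv document max_fields token_field label_field → Pre_parse_tsv document max_fields token_field label_field → Spec_parse_tsv document max_fields token_field label_field (parse_tsv document max_fields token_field label_field)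

-- ===== LEMMAS AND PROOFS =====

-- A's result as filter-then-map over the groups
def pvAout (mf tf lf : Int) (lines : List String) : List (List (String × List String)) :=
  ((pvGroupby lines).filter (·.1)).map (fun p => pvSentA mf tf lf p.2)

theorem parse_tsv_eq_pvAout (document : String) (mf tf lf : Int) :
    parse_tsv document mf tf lf = pvAout mf tf lf (PySem.Str.splitlines document) := by
  unfold parse_tsv pvAout
  rw [PySem.List.foldl_append_if]
  simp

theorem pvSentB_eq (mf tf lf : Int) (g : List String) :
    pvSentB mf tf lf g = pvSentA mf tf lf g := rfl

theorem pvAout_nil (mf tf lf : Int) : pvAout mf tf lf [] = [] := by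
  simp [pvAout, pvGroupby]

theorem pvAout_cons (mf tf lf : Int) (y : String) (ys : List String) :
    pvAout mf tf lf (y :: ys) =
      if y = "" then pvAout mf tf lf (pvTakeRun false ys).2
      else pvSentA mf tf lf (y :: (pvTakeRun true ys).1) :: pvAout mf tf lf (pvTakeRun true ys).2 := by
  by_cases h : y = "" <;>
    simp [pvAout, pvGroupby, pvKey, h]

theorem pvAout_takeRun_false (mf tf lf : Int) (ls : List String) :
    pvAout mf tf lf (pvTakeRun false ls).2 = pvAout mf tf lf ls := by
  induction ls with
  | nil => simp [pvTakeRun]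
  | cons y ys ih =>
    by_cases hy : y = ""
    · subst hy
      have h1 : pvTakeRun false ("" :: ys) = ("" :: (pvTakeRun false ys).1, (pvTakeRun false ys).2) := by
        simp [pvTakeRun, pvKey]
      rw [h1, pvAout_cons]
      simp
    · have h1 : pvTakeRun false (y :: ys) = ([], y :: ys) := by
        simp [pvTakeRun, pvKey, hy]
      rw [h1]

theorem pvAout_empty_cons (mf tf lf : Int) (ls : List String) :
    pvAout mf tf lf ("" :: ls) = pvAout mf tf lf ls := by
  rw [pvAout_cons]
  simp [pvAout_takeRun_false]

theorem pvTakeRun_true_all_ne (buf rest : List String) (hbuf : ∀ b ∈ buf, b ≠ "")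
    (hrest : rest = [] ∨ ∃ ls, rest = "" :: ls) :
    pvTakeRun true (buf ++ rest) = (buf, rest) := by
  induction buf with
  | nil =>
    rcases hrest with h | ⟨ls, h⟩ <;> subst h
    · simp [pvTakeRun]
    · simp [pvTakeRun, pvKey]
  | cons b buf ih =>
    have hb : pvKey b = true := by simp [pvKey, hbuf b (by simp)]
    simp only [List.cons_append, pvTakeRun, hb, beq_self_eq_true, if_true]
    rw [ih (fun x hx => hbuf x (by simp [hx]))]

-- ---- structure of pvBlanks ----

theorem pvBlanksF_shift (xs : List String) : ∀ (s t : Int),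
    (PySem.List.enumerate xs (s + t)).filterMap (fun p => if p.2 = "" then some p.1 else none) =
      ((PySem.List.enumerate xs s).filterMap (fun p => if p.2 = "" then some p.1 else none)).map (· + t) := by
  induction xs with
  | nil => intro s t; simp [PySem.List.enumerate_nil]
  | cons x xs ih =>
    intro s t
    rw [PySem.List.enumerate_cons, PySem.List.enumerate_cons, List.filterMap_cons, List.filterMap_cons]
    have h : s + t + 1 = (s + 1) + t := by ring
    rw [h, ih (s + 1) t]
    by_cases hx : x = "" <;> simp [hx]

theorem pvBlanks_cons (x : String) (xs : List String) :
    pvBlanks (x :: xs) = (if x = "" then [(0 : Int)] else []) ++ (pvBlanks xs).map (· + 1) := by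
  unfold pvBlanks
  rw [PySem.List.enumerate_cons, List.filterMap_cons]
  rw [pvBlanksF_shift xs 0 1]
  by_cases hx : x = "" <;> simp [hx]

theorem pvBlanks_nonneg (xs : List String) : ∀ b ∈ pvBlanks xs, 0 ≤ b := by
  induction xs with
  | nil => simp [pvBlanks, PySem.List.enumerate_nil]
  | cons x xs ih =>
    intro b hb
    rw [pvBlanks_cons] at hb
    rcases List.mem_append.mp hb with h | h
    · split at h <;> simp_all
    · obtain ⟨b', hb', rfl⟩ := List.mem_map.mp h
      have := ih b' hb'
      omega

theorem pvBlanks_nil_all (xs : List String) (h : pvBlanks xs = []) : ∀ l ∈ xs, l ≠ "" := by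
  induction xs with
  | nil => simp
  | cons x xs ih =>
    rw [pvBlanks_cons] at h
    rcases List.append_eq_nil_iff.mp h with ⟨h1, h2⟩
    intro l hl
    rcases List.mem_cons.mp hl with rfl | hl'
    · intro hx; simp [hx] at h1
    · exact ih (List.map_eq_nil_iff.mp h2) l hl'

theorem pvRun_of_blanks (xs : List String) : ∀ (j : Int) (js : List Int),
    pvBlanks xs = j :: js → pvTakeRun true xs = (xs.take j.toNat, xs.drop j.toNat) := by
  induction xs with
  | nil => intro j js h; simp [pvBlanks, PySem.List.enumerate_nil] at h
  | cons y ys ih =>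
    intro j js h
    rw [pvBlanks_cons] at h
    by_cases hy : y = ""
    · simp only [hy, if_true] at h
      obtain ⟨rfl, -⟩ := List.cons_eq_cons.mp (by simpa using h)
      subst hy
      simp [pvTakeRun, pvKey]
    · simp only [hy] at h
      rcases hbl : pvBlanks ys with _ | ⟨j', js'⟩
      · rw [hbl] at h; simp at h
      · rw [hbl] at h
        simp only [List.map_cons] at h
        obtain ⟨rfl, -⟩ := h
        have hj' : 0 ≤ j' := pvBlanks_nonneg ys j' (by rw [hbl]; simp)
        have hrun := ih j' js' hbl
        have hkey : pvKey y = true := by simp [pvKey, hy]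
        have htn : (j' + 1).toNat = j'.toNat + 1 := by omega
        simp [pvTakeRun, hkey, hrun, htn]

-- ---- B's result as filter-then-map over index pairs ----

def pvK (lines : List String) : List Int := pvBlanks lines ++ [(lines.length : Int)]

def pvPairs (lines : List String) : List (Int × Int) :=
  ((-1 : Int) :: pvK lines).zip (pvK lines)

def pvBres (mf tf lf : Int) (lines : List String) : List (List (String × List String)) :=
  ((pvPairs lines).filter (fun p => decide (p.1 + 1 < p.2))).map
    (fun p => pvSentB mf tf lf (PySem.List.slice lines (some (p.1 + 1)) (some p.2)))

theorem parse_tsv_alt_eq_pvBres (document : String) (mf tf lf : Int) :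
    parse_tsv_alt document mf tf lf = pvBres mf tf lf (PySem.Str.splitlines document) := by
  unfold parse_tsv_alt pvBres pvPairs pvK
  rw [PySem.List.foldl_append_ite]
  simp

theorem pvK_nonneg (xs : List String) : ∀ b ∈ pvK xs, 0 ≤ b := by
  intro b hb
  rcases List.mem_append.mp hb with h | h
  · exact pvBlanks_nonneg xs b h
  · simp at h; omega

theorem pvSliceShift (x : String) (xs : List String) (a b : Int) (ha : 0 ≤ a) (hb : 0 ≤ b) :
    PySem.List.slice (x :: xs) (some (a + 1)) (some (b + 1)) = PySem.List.slice xs (some a) (some b) := by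
  rw [PySem.List.slice_toNat (x :: xs) (by omega) (by omega), PySem.List.slice_toNat xs ha hb]
  have h1 : (a + 1).toNat = a.toNat + 1 := by omega
  have h2 : (b + 1).toNat = b.toNat + 1 := by omega
  rw [h1, h2, List.drop_succ_cons]
  congr 1
  omega

theorem pvSliceZero (x : String) (xs : List String) (b : Int) (hb : 0 ≤ b) :
    PySem.List.slice (x :: xs) (some 0) (some (b + 1)) = x :: PySem.List.slice xs (some 0) (some b) := by
  rw [PySem.List.slice_toNat (x :: xs) (by omega) (by omega), PySem.List.slice_toNat xs (by omega) hb]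
  have h2 : (b + 1).toNat = b.toNat + 1 := by omega
  simp [h2, List.take_succ_cons]

-- shifted tail pairs over (x :: xs) contribute the same sentences as the unshifted pairs over xs
theorem pvShifted (mf tf lf : Int) (x : String) (xs : List String) (P : List (Int × Int))
    (h : ∀ p ∈ P, -1 ≤ p.1 ∧ 0 ≤ p.2) :
    (((P.map (fun p => (p.1 + 1, p.2 + 1))).filter (fun p => decide (p.1 + 1 < p.2))).map
      (fun p => pvSentB mf tf lf (PySem.List.slice (x :: xs) (some (p.1 + 1)) (some p.2)))) =
    ((P.filter (fun p => decide (p.1 + 1 < p.2))).map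
      (fun p => pvSentB mf tf lf (PySem.List.slice xs (some (p.1 + 1)) (some p.2)))) := by
  rw [List.filter_map, List.map_map]
  have hfil : P.filter ((fun p => decide (p.1 + 1 < p.2)) ∘ (fun p => (p.1 + 1, p.2 + 1))) =
      P.filter (fun p => decide (p.1 + 1 < p.2)) := by
    apply List.filter_congr
    intro p _
    simp only [Function.comp]
    by_cases hc : p.1 + 1 < p.2
    · simp [hc, show p.1 + 1 + 1 < p.2 + 1 by omega]
    · simp [hc, show ¬ (p.1 + 1 + 1 < p.2 + 1) by omega]
  rw [hfil]
  apply List.map_congr_left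
  intro p hp
  have hmem := List.mem_filter.mp hp
  have hb := h p hmem.1
  simp only [Function.comp]
  rw [show p.1 + 1 + 1 = (p.1 + 1) + 1 from rfl, pvSliceShift x xs (p.1 + 1) p.2 (by omega) hb.2]

theorem pvPairs_bounds (xs : List String) : ∀ p ∈ pvPairs xs, -1 ≤ p.1 ∧ 0 ≤ p.2 := by
  intro p hp
  obtain ⟨h1, h2⟩ := List.of_mem_zip hp
  constructor
  · rcases List.mem_cons.mp h1 with h | h
    · omega
    · have := pvK_nonneg xs p.1 h; omega
  · exact pvK_nonneg xs p.2 h2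

-- main lemma: B's index-pair slicing produces exactly A's groupby sentences
theorem pvBres_eq_pvAout (mf tf lf : Int) (lines : List String) :
    pvBres mf tf lf lines = pvAout mf tf lf lines := by
  induction lines with
  | nil =>
    simp [pvBres, pvPairs, pvK, pvBlanks, PySem.List.enumerate_nil, pvAout_nil]
  | cons x xs ih =>
    by_cases hx : x = ""
    · -- blanks (""::xs) = shift of blanks xs with a leading (-1, 0) pair that contributes nothing
      subst hx
      have hK : pvK ("" :: xs) = ((-1 : Int) :: pvK xs).map (· + 1) := by
        unfold pvK
        rw [pvBlanks_cons]
        simp only [if_true]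
        simp [List.map_append]
      have hpairs : pvPairs ("" :: xs) =
          ((-1 : Int), (0 : Int)) :: (pvPairs xs).map (fun p => (p.1 + 1, p.2 + 1)) := by
        unfold pvPairs
        rw [hK]
        have hKx : ∃ k K', pvK xs = k :: K' := by
          unfold pvK
          cases pvBlanks xs with
          | nil => exact ⟨_, _, rfl⟩
          | cons a l => exact ⟨a, l ++ [(xs.length : Int)], by simp⟩
        obtain ⟨k, K', hk⟩ := hKx
        rw [hk]
        have hm : ((-1 : Int) + 1) :: ((k :: K').map (· + 1)) = ((-1 : Int) :: k :: K').map (· + 1) := by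
          simp
        show (((-1 : Int) :: ((-1 : Int) + 1) :: (k :: K').map (· + 1)).zip
            (((-1 : Int) + 1) :: (k :: K').map (· + 1))) = _
        rw [List.zip_cons_cons, hm, List.zip_map]
        refine List.cons_eq_cons.mpr ⟨by norm_num, ?_⟩
        apply List.map_congr_left
        intro p _
        simp [Prod.map]
      unfold pvBres
      rw [hpairs, List.filter_cons]
      have hcd : (decide (((-1 : Int), (0 : Int)).1 + 1 < ((-1 : Int), (0 : Int)).2)) = false := by
        show decide ((-1 : Int) + 1 < 0) = false
        simp only [decide_eq_false_iff_not]
        omega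
      rw [hcd, if_neg (by simp)]
      rw [pvShifted mf tf lf "" xs (pvPairs xs) (pvPairs_bounds xs)]
      rw [pvAout_empty_cons]
      exact ih
    · -- x ≠ "": the first pair covers x's run; the shifted tail is xs's tail contribution
      have hKx : ∃ k K', pvK xs = k :: K' := by
        unfold pvK
        cases pvBlanks xs with
        | nil => exact ⟨_, _, rfl⟩
        | cons a l => exact ⟨a, l ++ [(xs.length : Int)], by simp⟩
      obtain ⟨k, K', hk⟩ := hKx
      have hk0 : 0 ≤ k := pvK_nonneg xs k (by rw [hk]; simp)
      have hK : pvK (x :: xs) = (pvK xs).map (· + 1) := by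
        unfold pvK
        rw [pvBlanks_cons]
        simp only [hx]
        simp [List.map_append]
      have hpairs : pvPairs (x :: xs) =
          ((-1 : Int), k + 1) :: (((k :: K').zip K').map (fun p => (p.1 + 1, p.2 + 1))) := by
        unfold pvPairs
        rw [hK, hk]
        show (((-1 : Int) :: (k + 1) :: K'.map (· + 1)).zip ((k + 1) :: K'.map (· + 1))) = _
        rw [List.zip_cons_cons]
        have hm : ((k : Int) + 1) :: (K'.map (· + 1)) = ((k :: K').map (· + 1)) := by simp
        rw [hm, List.zip_map]
        refine List.cons_eq_cons.mpr ⟨by norm_num, ?_⟩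
        apply List.map_congr_left
        intro p _
        simp [Prod.map]
      have hpairsxs : pvPairs xs = ((-1 : Int), k) :: (k :: K').zip K' := by
        unfold pvPairs
        rw [hk]
        rfl
      have hZb : ∀ p ∈ (k :: K').zip K', -1 ≤ p.1 ∧ 0 ≤ p.2 := by
        intro p hp
        have : p ∈ pvPairs xs := by rw [hpairsxs]; exact List.mem_cons_of_mem _ hp
        exact pvPairs_bounds xs p this
      -- B's value on x :: xs
      have hBx : pvBres mf tf lf (x :: xs) =
          pvSentB mf tf lf (x :: PySem.List.slice xs (some 0) (some k)) ::
            (((k :: K').zip K').filter (fun p => decide (p.1 + 1 < p.2))).map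
              (fun p => pvSentB mf tf lf (PySem.List.slice xs (some (p.1 + 1)) (some p.2))) := by
        unfold pvBres
        rw [hpairs, List.filter_cons]
        have hcd : (decide (((-1 : Int), k + 1).1 + 1 < ((-1 : Int), k + 1).2)) = true := by
          show decide ((-1 : Int) + 1 < k + 1) = true
          simp only [decide_eq_true_eq]
          omega
        rw [hcd, if_pos rfl, List.map_cons]
        rw [pvShifted mf tf lf x xs _ hZb]
        congr 1
        show pvSentB mf tf lf (PySem.List.slice (x :: xs) (some ((-1 : Int) + 1)) (some (k + 1))) = _
        rw [show ((-1 : Int) + 1) = 0 from by norm_num]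
        rw [pvSliceZero x xs k hk0]
      -- B's value on xs
      have hBxs : pvBres mf tf lf xs =
          (if 0 < k then [pvSentB mf tf lf (PySem.List.slice xs (some 0) (some k))] else []) ++
            (((k :: K').zip K').filter (fun p => decide (p.1 + 1 < p.2))).map
              (fun p => pvSentB mf tf lf (PySem.List.slice xs (some (p.1 + 1)) (some p.2))) := by
        unfold pvBres
        rw [hpairsxs, List.filter_cons]
        by_cases h0 : 0 < k
        · have hcd : (decide (((-1 : Int), k).1 + 1 < ((-1 : Int), k).2)) = true := by
            show decide ((-1 : Int) + 1 < k) = true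
            simp only [decide_eq_true_eq]
            omega
          rw [hcd, if_pos rfl, List.map_cons, if_pos h0, List.singleton_append]
          congr 1
        · have hcd : (decide (((-1 : Int), k).1 + 1 < ((-1 : Int), k).2)) = false := by
            show decide ((-1 : Int) + 1 < k) = false
            simp only [decide_eq_false_iff_not]
            omega
          rw [hcd, if_neg (by simp), if_neg h0, List.nil_append]
      -- identify the run of xs with take/drop at k
      rcases hbl : pvBlanks xs with _ | ⟨j, js⟩
      · -- no blanks in xs: single block
        have hkn : k = (xs.length : Int) ∧ K' = [] := by
          have : pvK xs = [(xs.length : Int)] := by unfold pvK; rw [hbl]; simp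
          rw [hk] at this
          exact ⟨(List.cons_eq_cons.mp this).1, (List.cons_eq_cons.mp this).2⟩
        obtain ⟨rfl, rfl⟩ := hkn
        have hall : ∀ l ∈ xs, l ≠ "" := pvBlanks_nil_all xs hbl
        have hrun : pvTakeRun true xs = (xs, []) := by
          have := pvTakeRun_true_all_ne xs [] hall (Or.inl rfl)
          simpa using this
        rw [hBx]
        have hsl : PySem.List.slice xs (some 0) (some (xs.length : Int)) = xs := by
          rw [PySem.List.slice_toNat xs (by omega) (by omega)]
          simp
        rw [hsl, pvAout_cons, hrun]
        simp [hx, pvSentB_eq, pvAout_nil, List.zip_nil_right]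
      · -- first blank of xs at index j (= k)
        have hkj : k = j := by
          have : pvK xs = j :: (js ++ [(xs.length : Int)]) := by unfold pvK; rw [hbl]; simp
          rw [hk] at this
          exact (List.cons_eq_cons.mp this).1
        subst hkj
        have hrun : pvTakeRun true xs = (xs.take k.toNat, xs.drop k.toNat) :=
          pvRun_of_blanks xs k js hbl
        have hsl : PySem.List.slice xs (some 0) (some k) = xs.take k.toNat := by
          rw [PySem.List.slice_toNat xs (by omega) hk0]
          simp
        -- tail contribution = pvAout (drop k xs), via IH
        have hT : (((k :: K').zip K').filter (fun p => decide (p.1 + 1 < p.2))).map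
              (fun p => pvSentB mf tf lf (PySem.List.slice xs (some (p.1 + 1)) (some p.2))) =
            pvAout mf tf lf (xs.drop k.toNat) := by
          by_cases h0 : 0 < k
          · -- xs = y :: ys with y ≠ ""
            obtain ⟨y, ys, rfl⟩ : ∃ y ys, xs = y :: ys := by
              cases xs with
              | nil => simp [pvBlanks, PySem.List.enumerate_nil] at hbl
              | cons y ys => exact ⟨y, ys, rfl⟩
            have hy : y ≠ "" := by
              intro hy
              rw [pvBlanks_cons, hy] at hbl
              simp at hbl
              omega
            have hA : pvAout mf tf lf (y :: ys) =
                pvSentA mf tf lf (y :: (pvTakeRun true ys).1) :: pvAout mf tf lf (pvTakeRun true ys).2 := by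
              rw [pvAout_cons]; simp [hy]
            have hrun' : y :: (pvTakeRun true ys).1 = (y :: ys).take k.toNat ∧
                (pvTakeRun true ys).2 = (y :: ys).drop k.toNat := by
              have hkey : pvKey y = true := by simp [pvKey, hy]
              have hstep : pvTakeRun true (y :: ys) = (y :: (pvTakeRun true ys).1, (pvTakeRun true ys).2) := by
                simp [pvTakeRun, hkey]
              rw [hstep] at hrun
              exact ⟨congrArg Prod.fst hrun, congrArg Prod.snd hrun⟩
            rw [hBxs, if_pos h0, hA, hrun'.1, hrun'.2, hsl] at ih
            simpa [pvSentB_eq] using ih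
          · -- k = 0: xs begins with a blank, take 0 / drop 0
            have hk00 : k = 0 := by omega
            subst hk00
            rw [hBxs, if_neg (by omega)] at ih
            simpa using ih
        rw [hBx, hT, pvAout_cons, hrun, hsl, pvSentB_eq]
        simp [hx]

-- ===== VERDICT (by name: the statement is the Claim_ definition above) =====
theorem parse_tsv_spec : Claim_equal_parse_tsv := by
  intro document mf tf lf _ _
  unfold Spec_parse_tsv
  rw [parse_tsv_eq_pvAout, parse_tsv_alt_eq_pvBres, pvBres_eq_pvAout]
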